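-- pv_equiv track=rewrite | github.com/Zumh/helsinki | ds_and_al_2023/week2/onechar.py | count
-- ===== SOURCE A (Python) =====
-- def count(s):
--     total_char_length = 0
--     similar_char_length = 0
--     prev_char = ""
--
--     for current_char in s:
--         if current_char == prev_char:
--             # count all similar character from the string
--             similar_char_length += 1
--         else:
--             # count all the possible similar character sub string length
--             total_char_length += (similar_char_length*(similar_char_length+1))//2
--
--             # re-initialize similar chacter from 1 because we found a new unique character
--             similar_char_length = 1
--
--             # initialize previous character
--             prev_char = current_char
--
--     # collect the remaining similar character length
--     total_char_length += (similar_char_length*(similar_char_length+1))//2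
--     return total_char_length
-- ===== SOURCE B (Python) =====
-- def count(s):
--     # Directly enumerate the equal-character substrings: for each start index i,
--     # extend j while characters stay equal, counting one substring per step.
--     # No run-length bookkeeping and no triangular-number formula.
--     n = len(s)
--     ans = 0
--     for i in range(n):
--         j = i
--         while j < n and s[j] == s[i]:
--             ans += 1
--             j += 1
--     return ans
-- ===== Notes on version B (the rewrite author's own statement) =====
-- stated objective: alternative
-- what changed: B enumerates the equal-character substrings directly with a nested start/extend loop (one count per substring), instead of A's single linear scan that accumulates run lengths and applies the triangular-number formula L*(L+1)//2 per run.
import Mathlib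
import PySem

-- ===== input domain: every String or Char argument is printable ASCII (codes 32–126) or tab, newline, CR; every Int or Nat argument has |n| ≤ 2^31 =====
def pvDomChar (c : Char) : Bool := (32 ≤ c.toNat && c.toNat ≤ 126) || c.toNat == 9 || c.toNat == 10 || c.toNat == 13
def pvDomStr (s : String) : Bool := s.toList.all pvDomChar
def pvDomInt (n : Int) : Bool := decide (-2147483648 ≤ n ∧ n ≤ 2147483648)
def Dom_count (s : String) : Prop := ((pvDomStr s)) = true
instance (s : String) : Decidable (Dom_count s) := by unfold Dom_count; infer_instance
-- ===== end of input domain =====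

-- B counts equal-character substrings by direct enumeration (start/extend nested loop), with no run-length state or triangular formula (alternative algorithm; not faster).


-- ===== PORT A =====
def countStep (st : Int × Int × Option Char) (c : Char) : Int × Int × Option Char :=
  match st with
  | (t, k, p) =>
    if p = some c then (t, k + 1, p)
    else (t + PySem.Int.floordiv (k * (k + 1)) 2, 1, some c)

def count (s : String) : Int :=
  match s.toList.foldl countStep (0, 0, none) with
  | (t, k, _) => t + PySem.Int.floordiv (k * (k + 1)) 2

-- ===== PORT B =====
-- Source B's inner 'while j < n and s[j] == s[i]' loop from start index i: length of the
-- constant prefix of the remaining suffix (1 for s[i] itself + the matching tail).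
-- The outer 'for i in range(n)' loop walks the suffixes front to back.
def countFrom : List Char → Int
  | [] => 0
  | c :: cs => (1 + ((cs.takeWhile (· == c)).length : Int)) + countFrom cs

def count_alt (s : String) : Int := countFrom s.toList

-- ===== PRECONDITION & SPEC =====
def Spec_count (s : String) (out : Int) : Prop := out = count_alt s
instance (s : String) (out : Int) : Decidable (Spec_count s out) := by unfold Spec_count; infer_instance

-- ===== CLAIM (what is proved, stated in full; the proofs are below) =====
def Claim_equal_count : Prop := ∀ (s : String), Dom_count s → Spec_count s (count s)

-- ===== LEMMAS AND PROOFS =====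

def fin (st : Int × Int × Option Char) : Int :=
  st.1 + PySem.Int.floordiv (st.2.1 * (st.2.1 + 1)) 2

lemma tri_fd (m : Nat) :
    PySem.Int.floordiv ((m : Int) * ((m : Int) + 1)) 2 = ((m * (m + 1) / 2 : Nat) : Int) := by
  rw [show (m : Int) * ((m : Int) + 1) = ((m * (m + 1) : Nat) : Int) by push_cast; ring]
  exact_mod_cast PySem.Int.floordiv_natCast (m * (m + 1)) 2

lemma absorb (l : List Char) (c : Char) (t k : Int) :
    l.foldl countStep (t, k, some c) =
      (l.dropWhile (· == c)).foldl countStep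
        (t, k + ((l.takeWhile (· == c)).length : Int), some c) := by
  induction l generalizing k with
  | nil => simp
  | cons d ds ih =>
    by_cases h : d = c
    · subst h
      simp only [List.foldl_cons, countStep, List.takeWhile_cons, List.dropWhile_cons,
        beq_self_eq_true, if_true]
      rw [ih]
      have hk : k + 1 + ((ds.takeWhile (· == d)).length : Int)
          = k + (((d :: ds.takeWhile (· == d)).length : Nat) : Int) := by
        simp only [List.length_cons]; push_cast; ring
      rw [hk]
    · have hb : (d == c) = false := by simp [h]
      simp only [List.takeWhile_cons, List.dropWhile_cons, hb]
      simp

-- countFrom over a constant block of c's followed by a rest whose head is not c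
lemma countFrom_block (pre : List Char) (c : Char) (r : List Char)
    (hpre : ∀ d ∈ pre, d = c) (hr : ∀ d, r.head? = some d → d ≠ c) :
    countFrom (c :: (pre ++ r)) =
      (((pre.length + 1) * (pre.length + 2) / 2 : Nat) : Int) + countFrom r := by
  induction pre generalizing c with
  | nil =>
    have htw : r.takeWhile (· == c) = [] := by
      cases hh : r with
      | nil => simp
      | cons d ds =>
        have : d ≠ c := hr d (by simp [hh])
        simp [this]
    simp only [List.nil_append, countFrom, htw, List.length_nil]
    norm_num
  | cons d ds ih =>
    have hd : d = c := hpre d (by simp)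
    subst hd
    have hds : ∀ e ∈ ds, e = d := fun e he => hpre e (by simp [he])
    have htr : r.takeWhile (· == d) = [] := by
      cases hh : r with
      | nil => simp
      | cons e es =>
        have : e ≠ d := hr e (by simp [hh])
        simp [this]
    have hds' : ds.takeWhile (· == d) = ds := by
      apply List.takeWhile_eq_self_iff.mpr
      intro e he; simp [hds e he]
    have htw : (((d :: ds) ++ r).takeWhile (· == d)) = d :: ds := by
      rw [List.cons_append, List.takeWhile_cons]
      simp only [beq_self_eq_true, if_true]
      rw [List.takeWhile_append]
      simp [hds', htr]
    have hstep : countFrom (d :: ((d :: ds) ++ r))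
        = (1 + ((((d :: ds) ++ r).takeWhile (· == d)).length : Int))
          + countFrom ((d :: ds) ++ r) := rfl
    rw [hstep, htw]
    have hmid : countFrom ((d :: ds) ++ r) = countFrom (d :: (ds ++ r)) := by simp
    rw [hmid, ih d hds hr]
    have harith : ((ds.length + 1 + 1) * (ds.length + 1 + 2) / 2 : Nat)
        = (ds.length + 2) + ((ds.length + 1) * (ds.length + 2) / 2 : Nat) := by
      have h2 : (ds.length + 1 + 1) * (ds.length + 1 + 2)
          = (ds.length + 1) * (ds.length + 2) + (ds.length + 2) * 2 := by ring
      rw [h2, Nat.add_mul_div_right _ _ (by norm_num : 0 < 2)]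
      omega
    simp only [List.length_cons, harith]
    push_cast
    ring

-- main characterisation: A's folded state, finalised, equals B's countFrom, block by block
lemma main_lemma : ∀ (n : Nat) (l : List Char), l.length ≤ n → ∀ (c : Char) (t : Int),
    fin (l.foldl countStep (t, 1, some c)) = t + countFrom (c :: l) := by
  intro n
  induction n with
  | zero =>
    intro l hl c t
    have : l = [] := List.eq_nil_of_length_eq_zero (Nat.le_zero.mp hl)
    subst this
    simp [countFrom, fin, PySem.Int.floordiv]
  | succ n ih =>
    intro l hl c t
    have hpre : ∀ d ∈ l.takeWhile (· == c), d = c := by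
      intro d hd
      have := List.mem_takeWhile_imp hd
      simpa using this
    have hr : ∀ d, (l.dropWhile (· == c)).head? = some d → d ≠ c := by
      intro d hd
      have := List.head?_dropWhile_not (p := (· == c)) (l := l)
      rw [hd] at this; simpa using this
    have hblock : countFrom (c :: l)
        = ((((l.takeWhile (· == c)).length + 1) * ((l.takeWhile (· == c)).length + 2) / 2 : Nat) : Int)
          + countFrom (l.dropWhile (· == c)) := by
      conv_lhs => rw [show l = l.takeWhile (· == c) ++ l.dropWhile (· == c) from
        (List.takeWhile_append_dropWhile).symm]
      exact countFrom_block _ c _ hpre hr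
    rw [absorb, hblock]
    have hk : (1 : Int) + ((l.takeWhile (· == c)).length : Int)
        = (((l.takeWhile (· == c)).length + 1 : Nat) : Int) := by push_cast; ring
    rcases hdw : l.dropWhile (· == c) with _ | ⟨d, ds⟩
    · simp only [List.foldl_nil, fin, hk, countFrom]
      rw [tri_fd]
      have : ((l.takeWhile (· == c)).length + 1) * (((l.takeWhile (· == c)).length + 1) + 1)
          = ((l.takeWhile (· == c)).length + 1) * ((l.takeWhile (· == c)).length + 2) := by ring
      rw [this]
      push_cast
      ring
    · have hdc : d ≠ c := by apply hr; simp [hdw]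
      simp only [List.foldl_cons, countStep]
      rw [if_neg (by intro h; exact hdc (Option.some.inj h).symm)]
      have hlen : ds.length ≤ n := by
        have h1 : (l.dropWhile (· == c)).length ≤ l.length := List.length_dropWhile_le _ _
        rw [hdw] at h1
        simp only [List.length_cons] at h1
        omega
      rw [ih ds hlen d _]
      rw [hk, tri_fd]
      have : ((l.takeWhile (· == c)).length + 1) * (((l.takeWhile (· == c)).length + 1) + 1)
          = ((l.takeWhile (· == c)).length + 1) * ((l.takeWhile (· == c)).length + 2) := by ring
      rw [this]
      ring

-- ===== VERDICT (by name: the statement is the Claim_ definition above) =====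
theorem count_spec : Claim_equal_count := by
  intro s _
  unfold Spec_count count count_alt
  rcases hl : s.toList with _ | ⟨c, cs⟩
  · simp [countFrom, PySem.Int.floordiv]
  · simp only [List.foldl_cons, countStep]
    rw [if_neg (by simp)]
    have := main_lemma cs.length cs (le_refl _) c (0 + PySem.Int.floordiv (0 * (0 + 1)) 2)
    simp only [fin] at this
    rw [this]
    simp [PySem.Int.floordiv]
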